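-- pv_equiv track=rewrite | github.com/thirakawa/Course-AlgorithmDataStructure | example_python/06_str_matching/str_matching_bm.py | bm_search
-- ===== SOURCE A (Python) =====
-- def build_bad_character_table(pattern):
--     m = len(pattern)
--     table = {}
--
--     for i in range(m - 1):
--         table[pattern[i]] = m - 1 - i
--
--     return table
--
-- def bm_search(text, pattern):
--     n = len(text)
--     m = len(pattern)
--
--     if m == 0:
--         return []
--
--     bad_char = build_bad_character_table(pattern)
--     result = []
--
--     i = 0  # textの開始位置
--
--     while i <= n - m:
--         j = m - 1
--
--         # 右から比較
--         while j >= 0 and text[i + j] == pattern[j]: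
--             j -= 1
--
--         if j < 0:
--             # 完全一致
--             result.append(i)
--             i += m
--         else:
--             # 不一致時のシフト
--             shift = bad_char.get(text[i + j], m)
--             i += max(1, shift - (m - 1 - j))
--
--     return result
-- ===== SOURCE B (Python) =====
-- def bm_search(text, pattern):
--     if not pattern:
--         return []
--     result = []
--     i = text.find(pattern)
--     while i != -1:
--         result.append(i)
--         i = text.find(pattern, i + len(pattern))
--     return result
-- ===== Notes on version B (the rewrite author's own statement) =====
-- stated objective: idiomatic
-- what changed: Replaces the hand-rolled Boyer-Moore scan (per-call bad-character table, right-to-left window comparison, computed shifts) by repeated text.find(pattern, i) with a skip of len(pattern) after every hit, i.e. greedy non-overlapping selection delegated to the standard library's substring search.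
import Mathlib
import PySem

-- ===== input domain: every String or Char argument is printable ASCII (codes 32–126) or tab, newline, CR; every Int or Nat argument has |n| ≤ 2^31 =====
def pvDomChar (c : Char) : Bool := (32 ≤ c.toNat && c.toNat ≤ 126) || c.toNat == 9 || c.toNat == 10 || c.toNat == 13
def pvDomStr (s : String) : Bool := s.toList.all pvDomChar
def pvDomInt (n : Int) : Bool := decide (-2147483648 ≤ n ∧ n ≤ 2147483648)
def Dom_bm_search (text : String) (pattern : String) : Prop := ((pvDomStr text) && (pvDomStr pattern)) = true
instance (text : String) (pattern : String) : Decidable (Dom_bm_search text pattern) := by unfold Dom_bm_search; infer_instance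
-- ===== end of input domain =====

-- B replaces the hand-rolled Boyer-Moore (bad-character table, right-to-left window compare)
-- by repeated str.find with a skip of len(pattern) after each hit (same return value)


-- ===== PORT A =====
-- build_bad_character_table: for i in range(m-1): table[pattern[i]] = m-1-i
def pvBmTable (p : List Char) : PySem.Dict Char Int :=
  (PySem.List.pyRange 0 ((p.length : Int) - 1) 1).foldl
    (fun d i =>
      match PySem.List.pyGet? p i with
      | some c => d.insert c ((p.length : Int) - 1 - i)
      | none => d)   -- IndexError branch: unreachable, range indices are valid
    PySem.Dict.empty

-- inner while: while j >= 0 and text[i+j] == pattern[j]: j -= 1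
-- (fuel (j+1).toNat only bounds the countdown; the computation is the Python one)
def pvBmInnerF (t p : List Char) (i : Int) : Nat → Int → Int
  | 0, j => j
  | fuel + 1, j =>
    if 0 ≤ j then
      match PySem.List.pyGet? t (i + j), PySem.List.pyGet? p j with
      | some a, some b => if a = b then pvBmInnerF t p i fuel (j - 1) else j
      | _, _ => j   -- IndexError: unreachable for bm_search's calls (indices in range)
    else j

def pvBmInner (t p : List Char) (i j : Int) : Int := pvBmInnerF t p i (j + 1).toNat j

-- i += max(1, shift - (m - 1 - j))  with  shift = bad_char.get(text[i+j], m)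
def pvBmShift (t p : List Char) (bad : PySem.Dict Char Int) (i j : Int) : Int :=
  max 1 ((match PySem.List.pyGet? t (i + j) with
          | some c => bad.getD c (p.length : Int)
          | none => (p.length : Int))   -- IndexError: unreachable here
         - ((p.length : Int) - 1 - j))

-- outer while: while i <= n - m  (fuel = remaining window count; i grows by ≥ 1 a step)
def pvBmOuterF (t p : List Char) (bad : PySem.Dict Char Int) : Nat → Int → List Int → List Int
  | 0, _, acc => acc   -- fuel exhausted: unreachable with the fuel pvBmOuter supplies
  | fuel + 1, i, acc =>
    if i ≤ (t.length : Int) - (p.length : Int) then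
      let j := pvBmInner t p i ((p.length : Int) - 1)
      if j < 0 then
        pvBmOuterF t p bad fuel (i + (p.length : Int)) (acc ++ [i])
      else
        pvBmOuterF t p bad fuel (i + pvBmShift t p bad i j) acc
    else acc

def pvBmOuter (t p : List Char) (bad : PySem.Dict Char Int) (i : Int) (acc : List Int) : List Int :=
  pvBmOuterF t p bad ((t.length : Int) - (p.length : Int) - i + 1).toNat i acc

def bm_search (text : String) (pattern : String) : List Int :=
  let t := text.toList
  let p := pattern.toList
  if p.length = 0 then []
  else pvBmOuter t p (pvBmTable p) 0 []

-- ===== PORT B =====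
-- while i != -1: result.append(i); i = text.find(pattern, i + len(pattern))
-- (text.find(pattern, start) is PySem.Chars.findFrom; fuel = len(text)+1-start bounds the
--  loop, the computation is the Python one)
def pvBmAltLoopF (t p : List Char) : Nat → Nat → List Int
  | 0, _ => []   -- fuel exhausted: unreachable with the fuel pvBmAltLoop supplies
  | fuel + 1, s =>
    let k := PySem.Chars.findFrom t p ((s : Nat) : Int) none
    if k = -1 then []
    else k :: pvBmAltLoopF t p fuel (k.toNat + p.length)

def pvBmAltLoop (t p : List Char) (s : Nat) : List Int :=
  pvBmAltLoopF t p (t.length + 1 - s) s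

def bm_search_alt (text : String) (pattern : String) : List Int :=
  let t := text.toList
  let p := pattern.toList
  if p = [] then []
  else pvBmAltLoop t p 0

-- ===== PRECONDITION & SPEC =====
def Spec_bm_search (text : String) (pattern : String) (out : List Int) : Prop := out = bm_search_alt text pattern
instance (text : String) (pattern : String) (out : List Int) : Decidable (Spec_bm_search text pattern out) := by unfold Spec_bm_search; infer_instance

-- ===== CLAIM (what is proved, stated in full; the proofs are below) =====
def Claim_equal_bm_search : Prop := ∀ (text : String) (pattern : String), Dom_bm_search text pattern → Spec_bm_search text pattern (bm_search text pattern)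

-- ===== LEMMAS AND PROOFS =====

-- generic: a prefix agrees pointwise, and pointwise agreement gives a prefix
theorem pvPrefix_getElem? (p t : List Char) (h : p <+: t) (i : Nat) (hi : i < p.length) :
    t[i]? = p[i]? := by
  obtain ⟨r, rfl⟩ := h
  rw [List.getElem?_append_left hi]

theorem pvPointwise_prefix (p t : List Char) (hlen : p.length ≤ t.length)
    (h : ∀ i : Nat, i < p.length → t[i]? = p[i]?) : p <+: t := by
  have ht : t.take p.length = p := by
    apply List.ext_getElem?
    intro i
    by_cases hip : i < p.length
    · rw [List.getElem?_take_of_lt hip]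
      exact h i hip
    · rw [List.getElem?_eq_none (by simp only [List.length_take]; omega),
        List.getElem?_eq_none (by omega)]
  exact ht ▸ List.take_prefix p.length t

-- facts about text.find(pattern, s)
theorem pvFind_bounds (t p : List Char) (s : Nat) (hp : p ≠ []) (hs : s ≤ t.length)
    (hk : PySem.Chars.findFrom t p ((s : Nat) : Int) none ≠ -1) :
    s ≤ (PySem.Chars.findFrom t p ((s : Nat) : Int) none).toNat ∧
    (PySem.Chars.findFrom t p ((s : Nat) : Int) none).toNat + p.length ≤ t.length := by
  obtain ⟨h1, h2, _⟩ := PySem.Chars.findFrom_natCast_spec t p s hs hk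
  have hlen := h2.length_le
  simp only [List.length_drop] at hlen
  have hp1 : 0 < p.length := List.length_pos_of_ne_nil hp
  constructor
  · omega
  · omega

-- fuel-irrelevance and the one-step unfolding of B's loop
theorem pvBmAltLoopF_congr (t p : List Char) (hp : p ≠ []) :
    ∀ (f g s : Nat), s ≤ t.length → t.length + 1 - s ≤ f → t.length + 1 - s ≤ g →
      pvBmAltLoopF t p f s = pvBmAltLoopF t p g s := by
  intro f
  induction f with
  | zero => intro g s hs hf hg; omega
  | succ f ih =>
    intro g s hs hf hg
    cases g with
    | zero => omega
    | succ g =>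
      simp only [pvBmAltLoopF]
      by_cases hk : PySem.Chars.findFrom t p ((s : Nat) : Int) none = -1
      · rw [if_pos hk, if_pos hk]
      · rw [if_neg hk, if_neg hk]
        have hb := pvFind_bounds t p s hp hs hk
        have hp1 : 0 < p.length := List.length_pos_of_ne_nil hp
        congr 1
        exact ih g _ (by omega) (by omega) (by omega)

theorem pvBmAltLoop_eq (t p : List Char) (hp : p ≠ []) (s : Nat) (hs : s ≤ t.length) :
    pvBmAltLoop t p s =
      if PySem.Chars.findFrom t p ((s : Nat) : Int) none = -1 then []
      else PySem.Chars.findFrom t p ((s : Nat) : Int) none ::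
        pvBmAltLoop t p ((PySem.Chars.findFrom t p ((s : Nat) : Int) none).toNat + p.length) := by
  unfold pvBmAltLoop
  rw [show t.length + 1 - s = (t.length - s) + 1 by omega]
  simp only [pvBmAltLoopF]
  by_cases hk : PySem.Chars.findFrom t p ((s : Nat) : Int) none = -1
  · rw [if_pos hk, if_pos hk]
  · rw [if_neg hk, if_neg hk]
    have hb := pvFind_bounds t p s hp hs hk
    have hp1 : 0 < p.length := List.length_pos_of_ne_nil hp
    congr 1
    exact pvBmAltLoopF_congr t p hp _ _ _ (by omega) (by omega) (by omega)

-- reference greedy scan: leftmost matches, skip |p| after a hit, else advance by 1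
def pvGreedy (t p : List Char) (hp : p ≠ []) (s : Nat) : List Int :=
  if h : s + p.length ≤ t.length then
    if p.isPrefixOf (t.drop s) then
      ((s : Nat) : Int) :: pvGreedy t p hp (s + p.length)
    else pvGreedy t p hp (s + 1)
  else []
termination_by t.length - s
decreasing_by
  all_goals have hp1 : 0 < p.length := List.length_pos_of_ne_nil hp
  all_goals omega

theorem pvGreedy_nil_of_no_match (t p : List Char) (hp : p ≠ []) (s : Nat)
    (h : ∀ q : Nat, s ≤ q → ¬ p <+: t.drop q) : pvGreedy t p hp s = [] := by
  rw [pvGreedy]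
  split
  · next hle =>
    have hnp : ¬ p.isPrefixOf (t.drop s) = true := by
      intro hq
      exact h s le_rfl (List.isPrefixOf_iff_prefix.mp hq)
    rw [if_neg hnp]
    exact pvGreedy_nil_of_no_match t p hp (s + 1) (fun q hq => h q (by omega))
  · rfl
termination_by t.length - s
decreasing_by
  have hp1 : 0 < p.length := List.length_pos_of_ne_nil hp
  omega

theorem pvGreedy_skip (t p : List Char) (hp : p ≠ []) (s k : Nat) (hsk : s ≤ k)
    (h : ∀ q : Nat, s ≤ q → q < k → ¬ p <+: t.drop q) :
    pvGreedy t p hp s = pvGreedy t p hp k := by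
  by_cases heq : s = k
  · rw [heq]
  · have hlt : s < k := by omega
    rw [pvGreedy]
    split
    · next hle =>
      have hnp : ¬ p.isPrefixOf (t.drop s) = true := by
        intro hq
        exact h s le_rfl hlt (List.isPrefixOf_iff_prefix.mp hq)
      rw [if_neg hnp]
      exact pvGreedy_skip t p hp (s + 1) k (by omega) (fun q hq1 hq2 => h q (by omega) hq2)
    · next hle =>
      rw [pvGreedy, dif_neg (by omega)]
termination_by k - s
decreasing_by omega

-- B's loop computes the greedy scan
theorem pvBmAltLoop_eq_greedy (t p : List Char) (hp : p ≠ []) (s : Nat) (hs : s ≤ t.length) :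
    pvBmAltLoop t p s = pvGreedy t p hp s := by
  rw [pvBmAltLoop_eq t p hp s hs]
  by_cases hk : PySem.Chars.findFrom t p ((s : Nat) : Int) none = -1
  · rw [if_pos hk]
    have hno : ¬ p <:+: t.drop s := (PySem.Chars.findFrom_natCast_eq_neg_one_iff t p s hs).mp hk
    symm
    apply pvGreedy_nil_of_no_match
    intro q hq hpre
    apply hno
    have hdq : t.drop q = (t.drop s).drop (q - s) := by
      rw [List.drop_drop]; congr 1; omega
    exact (hdq ▸ hpre).isInfix.trans (List.drop_suffix (q - s) (t.drop s)).isInfix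
  · rw [if_neg hk]
    obtain ⟨h1, h2, h3⟩ := PySem.Chars.findFrom_natCast_spec t p s hs hk
    have hb := pvFind_bounds t p s hp hs hk
    rw [pvBmAltLoop_eq_greedy t p hp _ hb.2]
    rw [pvGreedy_skip t p hp s (PySem.Chars.findFrom t p ((s : Nat) : Int) none).toNat
      (by omega) h3]
    conv_rhs => rw [pvGreedy]
    rw [dif_pos hb.2, if_pos (List.isPrefixOf_iff_prefix.mpr h2)]
    congr 1
    omega
termination_by t.length - s
decreasing_by
  have hb := pvFind_bounds t p s hp hs hk
  have hp1 : 0 < p.length := List.length_pos_of_ne_nil hp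
  omega

-- table characterisation: fold over range(k)
def pvTfold (p : List Char) (k : Nat) : PySem.Dict Char Int :=
  (PySem.List.pyRange 0 ((k : Nat) : Int) 1).foldl
    (fun d i =>
      match PySem.List.pyGet? p i with
      | some c => d.insert c ((p.length : Int) - 1 - i)
      | none => d)
    PySem.Dict.empty

theorem pvBmTable_eq (p : List Char) : pvBmTable p = pvTfold p (p.length - 1) := by
  unfold pvBmTable pvTfold
  rcases Nat.eq_zero_or_pos p.length with h | h
  · rw [h]
    rw [PySem.List.pyRange_one_eq_nil (by norm_num), PySem.List.pyRange_one_eq_nil (by simp)]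
  · congr 2
    omega

theorem pvTfold_succ (p : List Char) (k : Nat) (hk : k < p.length) :
    pvTfold p (k + 1) = (pvTfold p k).insert (p[k]'hk) ((p.length : Int) - 1 - (k : Int)) := by
  unfold pvTfold
  rw [show (((k + 1 : Nat)) : Int) = ((k : Nat) : Int) + 1 by push_cast; ring]
  rw [PySem.List.pyRange_one_succ_right (by exact_mod_cast Nat.zero_le k)]
  rw [List.foldl_append]
  simp [PySem.List.pyGet?_natCast, List.getElem?_eq_getElem hk]

theorem pvTfold_le (p : List Char) (c : Char) :
    ∀ (k : Nat), k ≤ p.length → (pvTfold p k).getD c ((p.length : Int)) ≤ (p.length : Int) := by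
  intro k
  induction k with
  | zero =>
    intro _
    unfold pvTfold
    rw [PySem.List.pyRange_one_eq_nil (by simp)]
    simp [PySem.Dict.getD_empty]
  | succ k ih =>
    intro hk
    rw [pvTfold_succ p k (by omega), PySem.Dict.getD_insert]
    split
    · omega
    · exact ih (by omega)

theorem pvTfold_occ (p : List Char) (c : Char) :
    ∀ (k : Nat), k ≤ p.length → ∀ (r : Nat), r < k → ∀ (hrp : r < p.length), p[r]'hrp = c →
      (pvTfold p k).getD c ((p.length : Int)) ≤ (p.length : Int) - 1 - (r : Int) := by
  intro k
  induction k with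
  | zero => intro _ r hr _ _; exact absurd hr (by omega)
  | succ k ih =>
    intro hk r hr hrp hc
    rw [pvTfold_succ p k (by omega), PySem.Dict.getD_insert]
    split
    · next hceq => omega
    · next hcne =>
      have hrk : r ≠ k := by
        intro hre
        subst hre
        exact hcne hc.symm
      exact ih (by omega) r (by omega) hrp hc

-- bad-character shift safety: no occurrence can start inside the skipped region
theorem pvShift_safe (t p : List Char) (hp : p ≠ []) (i : Int) (hi : 0 ≤ i)
    (hin : i.toNat + p.length ≤ t.length) (r : Nat) (hr : r < p.length)
    (hc : t[i.toNat + r]? = some c)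
    (d : Nat) (hd1 : 1 ≤ d)
    (hdlt : (d : Int) < max 1 ((pvBmTable p).getD c ((p.length : Int))
              - ((p.length : Int) - 1 - (r : Int)))) :
    ¬ p <+: t.drop (i.toNat + d) := by
  intro hpre
  have hbad3 : (pvBmTable p).getD c ((p.length : Int)) ≤ (p.length : Int) := by
    rw [pvBmTable_eq]
    exact pvTfold_le p c (p.length - 1) (by omega)
  have hsh : (d : Int) < (pvBmTable p).getD c ((p.length : Int)) - ((p.length : Int) - 1 - (r : Int)) := by
    by_cases hx : (pvBmTable p).getD c ((p.length : Int)) - ((p.length : Int) - 1 - (r : Int)) ≤ 1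
    · rw [max_eq_left hx] at hdlt; omega
    · rw [max_eq_right (by omega)] at hdlt; exact hdlt
  have hdr : d ≤ r := by omega
  have hq : r - d < p.length - 1 := by omega
  have hpq : p[r - d]? = some c := by
    have h1 := pvPrefix_getElem? p (t.drop (i.toNat + d)) hpre (r - d) (by omega)
    rw [List.getElem?_drop] at h1
    rw [show i.toNat + d + (r - d) = i.toNat + r by omega] at h1
    rw [hc] at h1
    exact h1.symm
  have hpq' : p[r - d]'(by omega) = c := by
    rw [List.getElem?_eq_getElem (by omega : r - d < p.length)] at hpq
    exact Option.some.inj hpq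
  have hocc := pvTfold_occ p c (p.length - 1) (by omega) (r - d) hq (by omega) hpq'
  rw [← pvBmTable_eq] at hocc
  omega

-- inner loop characterisation: full match or a genuine mismatch position
theorem pvBmInner_spec (t p : List Char) (i : Int) (hi : 0 ≤ i)
    (hin : i.toNat + p.length ≤ t.length) (j : Int) (hj0 : -1 ≤ j) (hjm : j < (p.length : Int))
    (htail : ∀ j' : Nat, j < (j' : Int) → j' < p.length → t[i.toNat + j']? = p[j']?) :
    (pvBmInner t p i j = -1 ∧ p <+: t.drop i.toNat) ∨
    (∃ r : Nat, pvBmInner t p i j = (r : Int) ∧ (r : Int) ≤ j ∧ r < p.length ∧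
        t[i.toNat + r]? ≠ p[r]?) := by
  by_cases h : 0 ≤ j
  · have hta : (i + j).toNat = i.toNat + j.toNat := by omega
    have htb : i.toNat + j.toNat < t.length := by omega
    have htc : j.toNat < p.length := by omega
    have e1 : PySem.List.pyGet? t (i + j) = some (t[i.toNat + j.toNat]'htb) := by
      rw [PySem.List.pyGet?_of_nonneg t (show (0:Int) ≤ i + j by omega), hta,
        List.getElem?_eq_getElem htb]
    have e2 : PySem.List.pyGet? p j = some (p[j.toNat]'htc) := by
      rw [PySem.List.pyGet?_of_nonneg p h, List.getElem?_eq_getElem htc]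
    have hstep : pvBmInner t p i j =
        (if t[i.toNat + j.toNat]'htb = p[j.toNat]'htc then pvBmInner t p i (j - 1) else j) := by
      unfold pvBmInner
      rw [show ((j - 1) + 1).toNat = j.toNat by omega]
      rw [show (j + 1).toNat = j.toNat + 1 by omega]
      simp only [pvBmInnerF]
      rw [if_pos h]
      simp only [e1, e2]
    by_cases heq : t[i.toNat + j.toNat]'htb = p[j.toNat]'htc
    · rw [hstep, if_pos heq]
      have htail' : ∀ j' : Nat, j - 1 < (j' : Int) → j' < p.length →
          t[i.toNat + j']? = p[j']? := by
        intro j' h1 h2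
        by_cases hjj : (j' : Int) = j
        · have hj' : j' = j.toNat := by omega
          subst hj'
          rw [List.getElem?_eq_getElem htb, List.getElem?_eq_getElem htc, heq]
        · exact htail j' (by omega) h2
      rcases pvBmInner_spec t p i hi hin (j - 1) (by omega) (by omega) htail' with
        hL | ⟨r, h1', h2', h3', h4'⟩
      · exact Or.inl hL
      · exact Or.inr ⟨r, h1', by omega, h3', h4'⟩
    · rw [hstep, if_neg heq]
      right
      refine ⟨j.toNat, by omega, by omega, htc, ?_⟩
      rw [List.getElem?_eq_getElem htb, List.getElem?_eq_getElem htc]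
      intro hcon
      exact heq (Option.some.inj hcon)
  · left
    constructor
    · unfold pvBmInner
      rw [show (j + 1).toNat = 0 by omega]
      simp only [pvBmInnerF]
      omega
    · apply pvPointwise_prefix
      · simp only [List.length_drop]; omega
      · intro q hq
        rw [List.getElem?_drop]
        exact htail q (by omega) hq
termination_by (j + 1).toNat
decreasing_by omega

-- fuel-irrelevance and the one-step unfolding of A's outer loop
theorem pvBmShift_pos (t p : List Char) (bad : PySem.Dict Char Int) (i j : Int) :
    1 ≤ pvBmShift t p bad i j := le_max_left _ _

theorem pvBmOuterF_congr (t p : List Char) (bad : PySem.Dict Char Int) (hm : 0 < p.length) :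
    ∀ (f g : Nat) (i : Int) (acc : List Int),
      ((t.length : Int) - (p.length : Int) - i + 1).toNat ≤ f →
      ((t.length : Int) - (p.length : Int) - i + 1).toNat ≤ g →
      pvBmOuterF t p bad f i acc = pvBmOuterF t p bad g i acc := by
  intro f
  induction f with
  | zero =>
    intro g i acc hf hg
    cases g with
    | zero => rfl
    | succ g =>
      simp only [pvBmOuterF]
      rw [if_neg (by omega)]
  | succ f ih =>
    intro g i acc hf hg
    cases g with
    | zero =>
      simp only [pvBmOuterF]
      rw [if_neg (by omega)]
    | succ g =>
      simp only [pvBmOuterF]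
      by_cases hc : i ≤ (t.length : Int) - (p.length : Int)
      · rw [if_pos hc, if_pos hc]
        by_cases hj : pvBmInner t p i ((p.length : Int) - 1) < 0
        · rw [if_pos hj, if_pos hj]
          exact ih g _ _ (by omega) (by omega)
        · rw [if_neg hj, if_neg hj]
          have hsp := pvBmShift_pos t p bad i (pvBmInner t p i ((p.length : Int) - 1))
          exact ih g _ _ (by omega) (by omega)
      · rw [if_neg hc, if_neg hc]

theorem pvBmOuter_eq (t p : List Char) (bad : PySem.Dict Char Int) (hm : 0 < p.length)
    (i : Int) (acc : List Int) :
    pvBmOuter t p bad i acc =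
      if i ≤ (t.length : Int) - (p.length : Int) then
        (if pvBmInner t p i ((p.length : Int) - 1) < 0 then
          pvBmOuter t p bad (i + (p.length : Int)) (acc ++ [i])
        else
          pvBmOuter t p bad (i + pvBmShift t p bad i (pvBmInner t p i ((p.length : Int) - 1))) acc)
      else acc := by
  unfold pvBmOuter
  by_cases hc : i ≤ (t.length : Int) - (p.length : Int)
  · rw [if_pos hc]
    rw [show ((t.length : Int) - (p.length : Int) - i + 1).toNat
        = ((t.length : Int) - (p.length : Int) - i).toNat + 1 by omega]
    simp only [pvBmOuterF]
    rw [if_pos hc]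
    by_cases hj : pvBmInner t p i ((p.length : Int) - 1) < 0
    · rw [if_pos hj, if_pos hj]
      exact pvBmOuterF_congr t p bad hm _ _ _ _ (by omega) (by omega)
    · rw [if_neg hj, if_neg hj]
      have hsp := pvBmShift_pos t p bad i (pvBmInner t p i ((p.length : Int) - 1))
      exact pvBmOuterF_congr t p bad hm _ _ _ _ (by omega) (by omega)
  · rw [if_neg hc]
    rw [show ((t.length : Int) - (p.length : Int) - i + 1).toNat = 0 by omega]
    simp only [pvBmOuterF]

-- A's outer loop computes the greedy scan
theorem pvBmOuter_eq_greedy (t p : List Char) (hp : p ≠ []) (i : Int) (hi : 0 ≤ i)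
    (acc : List Int) :
    pvBmOuter t p (pvBmTable p) i acc = acc ++ pvGreedy t p hp i.toNat := by
  have hm1 : 0 < p.length := List.length_pos_of_ne_nil hp
  rw [pvBmOuter_eq t p (pvBmTable p) hm1 i acc]
  by_cases h : i ≤ (t.length : Int) - (p.length : Int)
  · rw [if_pos h]
    have hin : i.toNat + p.length ≤ t.length := by omega
    rcases pvBmInner_spec t p i hi hin ((p.length : Int) - 1) (by omega) (by omega)
        (fun j' h1 h2 => absurd h1 (by omega)) with
      ⟨hjeq, hpre⟩ | ⟨r, hjeq, hrle, hrm, hmis⟩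
    · rw [hjeq]
      rw [if_pos (by norm_num : (-1 : Int) < 0)]
      rw [pvBmOuter_eq_greedy t p hp (i + (p.length : Int)) (by omega) (acc ++ [i])]
      conv_rhs => rw [pvGreedy, dif_pos hin, if_pos (List.isPrefixOf_iff_prefix.mpr hpre)]
      rw [show (i + (p.length : Int)).toNat = i.toNat + p.length by omega]
      rw [Int.toNat_of_nonneg hi]
      simp
    · rw [hjeq]
      rw [if_neg (by omega)]
      have hta : (i + (r : Int)).toNat = i.toNat + r := by omega
      have htb : i.toNat + r < t.length := by omega
      have e3 : PySem.List.pyGet? t (i + (r : Int)) = some (t[i.toNat + r]'htb) := by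
        rw [PySem.List.pyGet?_of_nonneg t (show (0:Int) ≤ i + (r : Int) by omega), hta,
          List.getElem?_eq_getElem htb]
      have e4 : pvBmShift t p (pvBmTable p) i (r : Int)
          = max 1 ((pvBmTable p).getD (t[i.toNat + r]'htb) ((p.length : Int))
              - ((p.length : Int) - 1 - (r : Int))) := by
        unfold pvBmShift
        simp only [e3]
      rw [e4]
      have hnomatch0 : ¬ p <+: t.drop i.toNat := by
        intro hpre
        apply hmis
        have := pvPrefix_getElem? p (t.drop i.toNat) hpre r hrm
        rw [List.getElem?_drop] at this
        exact this
      have hsh1 : (1 : Int) ≤ max 1 ((pvBmTable p).getD (t[i.toNat + r]'htb) ((p.length : Int))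
          - ((p.length : Int) - 1 - (r : Int))) := le_max_left _ _
      have hskip : pvGreedy t p hp i.toNat
          = pvGreedy t p hp (i + max 1 ((pvBmTable p).getD (t[i.toNat + r]'htb) ((p.length : Int))
              - ((p.length : Int) - 1 - (r : Int)))).toNat := by
        apply pvGreedy_skip t p hp _ _ (by omega)
        intro q hq1 hq2
        by_cases hq0 : q = i.toNat
        · rw [hq0]; exact hnomatch0
        · have hd1 : 1 ≤ q - i.toNat := by omega
          have hsafe := pvShift_safe t p hp i hi hin r hrm
            (List.getElem?_eq_getElem htb) (q - i.toNat) hd1 (by omega)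
          rw [show i.toNat + (q - i.toNat) = q by omega] at hsafe
          exact hsafe
      rw [pvBmOuter_eq_greedy t p hp _ (by omega) acc, ← hskip]
  · rw [if_neg h]
    rw [pvGreedy, dif_neg (by omega)]
    simp
termination_by ((t.length : Int) - (p.length : Int) - i + 1).toNat
decreasing_by
  · omega
  · have := hsh1; omega

-- ===== VERDICT (by name: the statement is the Claim_ definition above) =====
theorem bm_search_spec : Claim_equal_bm_search := by
  intro text pattern _
  unfold Spec_bm_search bm_search bm_search_alt
  by_cases hp : pattern.toList = []
  · simp [hp]
  · have hm : ¬ pattern.toList.length = 0 := by simpa using hp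
    simp only [hm, hp, if_false]
    rw [pvBmAltLoop_eq_greedy text.toList pattern.toList hp 0 (Nat.zero_le _)]
    have h0 := pvBmOuter_eq_greedy text.toList pattern.toList hp 0 le_rfl []
    simpa using h0
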